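-- pv_equiv track=rewrite | github.com/MJanczuk/Python | Obiekt/Kegums/WykresROTStab.py | Widelki
-- ===== SOURCE A (Python) =====
-- def Widelki(Arr, Min, Max):
--     Ok = 0
--     for i in range(len(Arr)):
--         if Arr[i] <= Min:
--             Ok = i
--         if Arr[i] >= Max:
--             Ok = i
--     return Ok
-- ===== SOURCE B (Python) =====
-- def Widelki(Arr, Min, Max):
--     for i in range(len(Arr) - 1, -1, -1):
--         if Arr[i] <= Min or Arr[i] >= Max:
--             return i
--     return 0
-- ===== Notes on version B (the rewrite author's own statement) =====
-- stated objective: faster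
-- what changed: Replaces the forward full scan that overwrites an accumulator by a backward scan returning the first qualifying index immediately (early exit, no accumulator).
import Mathlib
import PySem

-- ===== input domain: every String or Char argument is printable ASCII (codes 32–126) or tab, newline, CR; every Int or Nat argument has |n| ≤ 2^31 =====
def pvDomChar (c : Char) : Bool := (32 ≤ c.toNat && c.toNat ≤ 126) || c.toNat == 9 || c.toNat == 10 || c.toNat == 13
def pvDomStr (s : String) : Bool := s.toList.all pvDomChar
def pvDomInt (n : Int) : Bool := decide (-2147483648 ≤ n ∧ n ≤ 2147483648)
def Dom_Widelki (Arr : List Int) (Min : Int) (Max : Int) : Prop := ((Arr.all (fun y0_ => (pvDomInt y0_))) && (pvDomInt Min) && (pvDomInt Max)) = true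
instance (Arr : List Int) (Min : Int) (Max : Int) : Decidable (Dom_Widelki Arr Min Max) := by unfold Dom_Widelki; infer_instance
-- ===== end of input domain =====

-- ===== PORT A =====
-- Port of A: forward scan over range(len(Arr)), overwriting the accumulator Ok.
def Widelki (Arr : List Int) (Min : Int) (Max : Int) : Int :=
  (PySem.List.pyRange 0 (Arr.length : Int) 1).foldl (fun Ok i =>
    let v := PySem.List.pyGetD Arr i 0
    let Ok := if v ≤ Min then i else Ok
    if v ≥ Max then i else Ok) 0

-- ===== PORT B =====
-- Port of B: backward scan with early exit, return the first qualifying index; 0 if none.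
def WidelkiAltGo (Arr : List Int) (Min : Int) (Max : Int) : Nat → Int
  | 0 => 0
  | n + 1 =>
    let v := PySem.List.pyGetD Arr (n : Int) 0
    if v ≤ Min ∨ v ≥ Max then (n : Int) else WidelkiAltGo Arr Min Max n

def Widelki_alt (Arr : List Int) (Min : Int) (Max : Int) : Int :=
  WidelkiAltGo Arr Min Max Arr.length

-- ===== PRECONDITION & SPEC =====
def Spec_Widelki (Arr : List Int) (Min : Int) (Max : Int) (out : Int) : Prop := out = Widelki_alt Arr Min Max
instance (Arr : List Int) (Min : Int) (Max : Int) (out : Int) : Decidable (Spec_Widelki Arr Min Max out) := by unfold Spec_Widelki; infer_instance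

-- ===== CLAIM (what is proved, stated in full; the proofs are below) =====
def Claim_equal_Widelki : Prop := ∀ (Arr : List Int) (Min : Int) (Max : Int), Dom_Widelki Arr Min Max → Spec_Widelki Arr Min Max (Widelki Arr Min Max)

-- ===== LEMMAS AND PROOFS =====

-- A's fold over range(0, n) equals B's countdown helper at n, for every n.
theorem widelki_fold_eq_go (Arr : List Int) (Min Max : Int) (n : Nat) :
    (PySem.List.pyRange 0 (n : Int) 1).foldl (fun Ok i =>
      let v := PySem.List.pyGetD Arr i 0
      let Ok := if v ≤ Min then i else Ok
      if v ≥ Max then i else Ok) 0 = WidelkiAltGo Arr Min Max n := by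
  induction n with
  | zero => simp [WidelkiAltGo]
  | succ n ih =>
    have h : ((n : Int) + 1) = ((n + 1 : Nat) : Int) := by push_cast; ring
    rw [← h, PySem.List.pyRange_one_succ_right (by positivity), List.foldl_append, ih]
    simp only [List.foldl, WidelkiAltGo, PySem.List.pyGetD]
    split_ifs <;> first | rfl | omega

-- ===== VERDICT (by name: the statement is the Claim_ definition above) =====
theorem Widelki_spec : Claim_equal_Widelki := by
  intro Arr Min Max _
  unfold Spec_Widelki Widelki Widelki_alt
  exact widelki_fold_eq_go Arr Min Max Arr.length
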